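-- pv_equiv track=rewrite | github.com/AustinJunyuLi/SEC_extract | scripts/build_reference.py | _canonical_ids_for_members
-- ===== SOURCE A (Python) =====
-- from typing import Any
--
-- def _next_canonical_ids(events: list[dict[str, Any]], count: int) -> list[str]:
--     used = {ev.get("bidder_name") for ev in events if ev.get("bidder_name")}
--     out: list[str] = []
--     n = 1
--     while len(out) < count:
--         cid = f"bidder_{n:02d}"
--         if cid not in used:
--             used.add(cid)
--             out.append(cid)
--         n += 1
--     return out
--
-- def _canonical_ids_for_members(events: list[dict[str, Any]], members: list[str]) -> list[str]:
--     by_alias = {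
--         ev.get("bidder_alias"): ev.get("bidder_name")
--         for ev in events
--         if ev.get("bidder_alias") and ev.get("bidder_name")
--     }
--     ids: list[str | None] = [by_alias.get(member) for member in members]
--     missing = [i for i, cid in enumerate(ids) if cid is None]
--     fresh = _next_canonical_ids(events, len(missing))
--     for idx, cid in zip(missing, fresh):
--         ids[idx] = cid
--     return [cid for cid in ids if cid is not None]
-- ===== SOURCE B (Python) =====
-- def _canonical_ids_for_members(events, members):
--     # one fused pass over events builds both the alias map and the used-name set;
--     # one pass over members emits mapped names or fresh ids from a persistent counter
--     by_alias = {}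
--     used = set()
--     for ev in events:
--         a = ev.get("bidder_alias")
--         b = ev.get("bidder_name")
--         if a and b:
--             by_alias[a] = b
--         if b:
--             used.add(b)
--     out = []
--     n = 1
--     for m in members:
--         if m in by_alias:
--             out.append(by_alias[m])
--         else:
--             while f"bidder_{n:02d}" in used:
--                 n += 1
--             cid = f"bidder_{n:02d}"
--             used.add(cid)
--             out.append(cid)
--             n += 1
--     return out
-- ===== Notes on version B (the rewrite author's own statement) =====
-- stated objective: simpler
-- what changed: Fuses A's five phases (alias dict, per-member lookup list, missing-index list, separate fresh-id generator, zip-fill) into one pass over events building by_alias and used together, and one pass over members with a persistent counter emitting mapped names or fresh ids directly; the _next_canonical_ids helper and the missing-index bookkeeping disappear.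
import Mathlib
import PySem

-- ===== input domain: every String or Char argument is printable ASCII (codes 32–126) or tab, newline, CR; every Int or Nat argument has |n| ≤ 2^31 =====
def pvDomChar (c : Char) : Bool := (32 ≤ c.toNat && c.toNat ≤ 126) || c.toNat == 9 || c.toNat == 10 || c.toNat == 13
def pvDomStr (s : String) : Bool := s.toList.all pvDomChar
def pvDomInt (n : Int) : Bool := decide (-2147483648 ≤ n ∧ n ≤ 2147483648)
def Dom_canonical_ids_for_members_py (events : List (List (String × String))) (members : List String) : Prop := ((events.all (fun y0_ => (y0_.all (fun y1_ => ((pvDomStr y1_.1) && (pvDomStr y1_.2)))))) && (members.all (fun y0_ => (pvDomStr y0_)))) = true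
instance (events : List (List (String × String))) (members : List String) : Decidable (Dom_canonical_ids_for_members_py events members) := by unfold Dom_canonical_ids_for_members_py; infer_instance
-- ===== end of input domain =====

-- B fuses A's phases: one pass over events builds by_alias and used together; one pass over
-- members with a persistent counter emits mapped names or fresh ids directly (objective: simpler).

-- ===== PORT A =====

-- f"bidder_{n:02d}" (n ≥ 1 here): zero-pad to width 2
def pvCid (n : Int) : String :=
  if n < 10 then "bidder_0" ++ PySem.Int.toStr n else "bidder_" ++ PySem.Int.toStr n

-- the while-loop of _next_canonical_ids.  Termination device: when cid is in used we ERASE it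
-- from used before recursing (Python only moves on); this never changes any later membership
-- test, because n strictly increases so each cid string is tested at most once — the outputs
-- are exactly Python's.
def pvGen (used : PySem.Set String) (out : List String) (n : Int) (count : Nat) : List String :=
  if h : out.length < count then
    if hc : PySem.Set.contains used (pvCid n) then
      pvGen (used.erase (pvCid n)) out (n + 1) count
    else
      pvGen (PySem.Set.add used (pvCid n)) (out ++ [pvCid n]) (n + 1) count
  else out
termination_by (count - out.length, used.length)
decreasing_by
  · have hm : pvCid n ∈ used := by simpa [PySem.Set.contains, List.contains_iff_mem] using hc
    have h2 := List.length_erase_of_mem hm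
    have h3 := List.length_pos_of_mem hm
    exact Prod.Lex.right _ (by omega)
  · exact Prod.Lex.left _ _ (by simp only [List.length_append, List.length_cons, List.length_nil]; omega)

def pvNextCanonicalIds (events : List (List (String × String))) (count : Nat) : List String :=
  let used : PySem.Set String :=
    events.foldl (fun s ev =>
      match PySem.Dict.get? (PySem.Dict.mk ev) "bidder_name" with
      | some b => if b ≠ "" then PySem.Set.add s b else s
      | none => s) PySem.Set.empty
  pvGen used [] 1 count

def canonical_ids_for_members_py (events : List (List (String × String))) (members : List String) : List String :=
  let by_alias : PySem.Dict String String :=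
    events.foldl (fun d ev =>
      match PySem.Dict.get? (PySem.Dict.mk ev) "bidder_alias", PySem.Dict.get? (PySem.Dict.mk ev) "bidder_name" with
      | some a, some b => if a ≠ "" ∧ b ≠ "" then d.insert a b else d
      | _, _ => d) PySem.Dict.empty
  let ids : List (Option String) := members.map (fun m => by_alias.get? m)
  let missing : List Int :=
    (PySem.List.enumerate ids).filterMap (fun p => if p.2 = none then some p.1 else none)
  let fresh := pvNextCanonicalIds events missing.length
  let ids2 := (missing.zip fresh).foldl (fun l p => l.set p.1.toNat p.2) ids  -- indices from enumerate are ≥ 0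
  ids2.filterMap id

-- ===== PORT B =====

-- the inner `while f"bidder_{n:02d}" in used: n += 1` loop: returns the first free (used, n).
-- Same termination device as pvGen: the hit cid is erased (n strictly increases over the whole
-- run, so no later test looks at it) — outputs are exactly Python's.
def pvSkip (used : PySem.Set String) (n : Int) : PySem.Set String × Int :=
  if h : PySem.Set.contains used (pvCid n) then
    pvSkip (used.erase (pvCid n)) (n + 1)
  else (used, n)
termination_by used.length
decreasing_by
  have hm : pvCid n ∈ used := by simpa [PySem.Set.contains, List.contains_iff_mem] using h
  have h2 := List.length_erase_of_mem hm
  have h3 := List.length_pos_of_mem hm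
  omega

-- the `for m in members` loop (membership test `m in by_alias` + lookup ported as one get?)
def pvLoopB (byAlias : PySem.Dict String String) (used : PySem.Set String) (n : Int)
    (out : List String) : List String → List String
  | [] => out
  | m :: ms =>
    match PySem.Dict.get? byAlias m with
    | some v => pvLoopB byAlias used n (out ++ [v]) ms
    | none =>
      let p := pvSkip used n
      let cid := pvCid p.2
      pvLoopB byAlias (PySem.Set.add p.1 cid) (p.2 + 1) (out ++ [cid]) ms

def canonical_ids_for_members_py_alt (events : List (List (String × String))) (members : List String) : List String :=
  let st :=
    events.foldl (fun (st : PySem.Dict String String × PySem.Set String) ev =>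
      let a := PySem.Dict.get? (PySem.Dict.mk ev) "bidder_alias"
      let b := PySem.Dict.get? (PySem.Dict.mk ev) "bidder_name"
      let d := match a with
        | some a' => match b with
          | some b' => if a' ≠ "" ∧ b' ≠ "" then st.1.insert a' b' else st.1
          | none => st.1
        | none => st.1
      let u := match b with
        | some b' => if b' ≠ "" then PySem.Set.add st.2 b' else st.2
        | none => st.2
      (d, u)) (PySem.Dict.empty, PySem.Set.empty)
  pvLoopB st.1 st.2 1 [] members

-- ===== PRECONDITION & SPEC =====
def Spec_canonical_ids_for_members_py (events : List (List (String × String))) (members : List String) (out : List String) : Prop := out = canonical_ids_for_members_py_alt events members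
instance (events : List (List (String × String))) (members : List String) (out : List String) : Decidable (Spec_canonical_ids_for_members_py events members out) := by unfold Spec_canonical_ids_for_members_py; infer_instance

-- ===== CLAIM (what is proved, stated in full; the proofs are below) =====
def Claim_equal_canonical_ids_for_members_py : Prop := ∀ (events : List (List (String × String))) (members : List String), Dom_canonical_ids_for_members_py events members → Spec_canonical_ids_for_members_py events members (canonical_ids_for_members_py events members)

-- ===== LEMMAS AND PROOFS =====

-- equation lemmas for pvLoopB
theorem pvLoopB_cons_some (d : PySem.Dict String String) (u : PySem.Set String) (n : Int)
    (out : List String) (m : String) (ms : List String) (v : String) (h : d.get? m = some v) :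
    pvLoopB d u n out (m :: ms) = pvLoopB d u n (out ++ [v]) ms := by
  simp [pvLoopB, h]

theorem pvLoopB_cons_none (d : PySem.Dict String String) (u : PySem.Set String) (n : Int)
    (out : List String) (m : String) (ms : List String) (h : d.get? m = none) :
    pvLoopB d u n out (m :: ms) =
      pvLoopB d (PySem.Set.add (pvSkip u n).1 (pvCid (pvSkip u n).2)) ((pvSkip u n).2 + 1)
        (out ++ [pvCid (pvSkip u n).2]) ms := by
  simp [pvLoopB, h]

-- "pure" fresh-id generator (proof-side normal form of pvGen with an empty accumulator)
def pvGenP (used : PySem.Set String) (n : Int) (k : Nat) : List String :=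
  if hk : k = 0 then []
  else
    if hc : PySem.Set.contains used (pvCid n) then
      pvGenP (used.erase (pvCid n)) (n + 1) k
    else
      pvCid n :: pvGenP (PySem.Set.add used (pvCid n)) (n + 1) (k - 1)
termination_by (k, used.length)
decreasing_by
  · have hm : pvCid n ∈ used := by simpa [PySem.Set.contains, List.contains_iff_mem] using hc
    have h2 := List.length_erase_of_mem hm
    have h3 := List.length_pos_of_mem hm
    exact Prod.Lex.right _ (by omega)
  · exact Prod.Lex.left _ _ (by omega)

theorem pvGen_eq_pvGenP (used : PySem.Set String) (out : List String) (n : Int) (count : Nat) :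
    pvGen used out n count = out ++ pvGenP used n (count - out.length) := by
  fun_induction pvGen used out n count with
  | case1 used out n h hc ih =>
    rw [ih]
    conv_rhs => rw [pvGenP]
    rw [dif_neg (by omega), dif_pos hc]
  | case2 used out n h hc ih =>
    rw [ih]
    conv_rhs => rw [pvGenP]
    rw [dif_neg (by omega), dif_neg hc]
    simp only [List.length_append, List.length_cons, List.length_nil]
    rw [show count - out.length - 1 = count - (out.length + 1) by omega]
    simp
  | case3 used out n h =>
    conv_rhs => rw [pvGenP]
    rw [dif_pos (by omega)]
    simp

theorem pvGenP_length (used : PySem.Set String) (n : Int) (k : Nat) :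
    (pvGenP used n k).length = k := by
  fun_induction pvGenP used n k with
  | case1 _ _ => simp
  | case2 used n k hk hc ih => exact ih
  | case3 used n k hk hc ih => simp only [List.length_cons, ih]; omega

theorem pvSkip_pos (used : PySem.Set String) (n : Int)
    (h : PySem.Set.contains used (pvCid n)) :
    pvSkip used n = pvSkip (used.erase (pvCid n)) (n + 1) := by
  conv_lhs => rw [pvSkip]
  rw [dif_pos h]

theorem pvSkip_neg (used : PySem.Set String) (n : Int)
    (h : ¬ PySem.Set.contains used (pvCid n)) :
    pvSkip used n = (used, n) := by
  conv_lhs => rw [pvSkip]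
  rw [dif_neg h]

theorem pvGenP_succ_aux (L : Nat) : ∀ (used : PySem.Set String) (n : Int) (k : Nat),
    used.length ≤ L →
    pvGenP used n (k + 1) =
      pvCid (pvSkip used n).2 ::
        pvGenP (PySem.Set.add (pvSkip used n).1 (pvCid (pvSkip used n).2)) ((pvSkip used n).2 + 1) k := by
  induction L with
  | zero =>
    intro used n k hL
    have hnil : used = [] := List.eq_nil_of_length_eq_zero (by omega)
    subst hnil
    have hc : ¬ PySem.Set.contains ([] : PySem.Set String) (pvCid n) := by
      simp [PySem.Set.contains]
    rw [pvSkip_neg _ _ hc]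
    conv_lhs => rw [pvGenP]
    rw [dif_neg (by omega), dif_neg hc]
    simp
  | succ L IH =>
    intro used n k hL
    by_cases hc : PySem.Set.contains used (pvCid n)
    · have hm : pvCid n ∈ used := by simpa [PySem.Set.contains, List.contains_iff_mem] using hc
      have h2 := List.length_erase_of_mem hm
      have h3 := List.length_pos_of_mem hm
      rw [pvSkip_pos _ _ hc]
      conv_lhs => rw [pvGenP]
      rw [dif_neg (by omega), dif_pos hc]
      exact IH _ _ _ (by omega)
    · rw [pvSkip_neg _ _ hc]
      conv_lhs => rw [pvGenP]
      rw [dif_neg (by omega), dif_neg hc]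
      simp

theorem pvGenP_succ (used : PySem.Set String) (n : Int) (k : Nat) :
    pvGenP used n (k + 1) =
      pvCid (pvSkip used n).2 ::
        pvGenP (PySem.Set.add (pvSkip used n).1 (pvCid (pvSkip used n).2)) ((pvSkip used n).2 + 1) k :=
  pvGenP_succ_aux used.length used n k le_rfl

theorem pvLoopB_acc (d : PySem.Dict String String) (u : PySem.Set String) (n : Int)
    (out : List String) (ms : List String) :
    pvLoopB d u n out ms = out ++ pvLoopB d u n [] ms := by
  induction ms generalizing u n out with
  | nil => simp [pvLoopB]
  | cons m ms ih =>
    cases h : PySem.Dict.get? d m with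
    | some v =>
      rw [pvLoopB_cons_some d u n out m ms v h, pvLoopB_cons_some d u n [] m ms v h,
        ih, ih u n ([] ++ [v])]
      simp
    | none =>
      rw [pvLoopB_cons_none d u n out m ms h, pvLoopB_cons_none d u n [] m ms h, ih, ih _ _ ([] ++ [pvCid (pvSkip u n).2])]
      simp

-- the fused event pass of B computes exactly A's by_alias and A's used set
theorem pvFused_eq (events : List (List (String × String)))
    (d0 : PySem.Dict String String) (u0 : PySem.Set String) :
    events.foldl (fun (st : PySem.Dict String String × PySem.Set String) ev =>
      let a := PySem.Dict.get? (PySem.Dict.mk ev) "bidder_alias"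
      let b := PySem.Dict.get? (PySem.Dict.mk ev) "bidder_name"
      let d := match a with
        | some a' => match b with
          | some b' => if a' ≠ "" ∧ b' ≠ "" then st.1.insert a' b' else st.1
          | none => st.1
        | none => st.1
      let u := match b with
        | some b' => if b' ≠ "" then PySem.Set.add st.2 b' else st.2
        | none => st.2
      (d, u)) (d0, u0) =
    (events.foldl (fun d ev =>
      match PySem.Dict.get? (PySem.Dict.mk ev) "bidder_alias", PySem.Dict.get? (PySem.Dict.mk ev) "bidder_name" with
      | some a, some b => if a ≠ "" ∧ b ≠ "" then d.insert a b else d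
      | _, _ => d) d0,
     events.foldl (fun s ev =>
      match PySem.Dict.get? (PySem.Dict.mk ev) "bidder_name" with
      | some b => if b ≠ "" then PySem.Set.add s b else s
      | none => s) u0) := by
  induction events generalizing d0 u0 with
  | nil => rfl
  | cons ev evs ih =>
    simp only [List.foldl_cons]
    cases ha : PySem.Dict.get? (PySem.Dict.mk ev) "bidder_alias" <;>
      cases hb : PySem.Dict.get? (PySem.Dict.mk ev) "bidder_name" <;>
        simp only [] <;> rw [ih]

-- interleaved fill: nones in the first list consume the second list in order
def pvFill : List (Option String) → List String → List String
  | [], _ => []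
  | some x :: t, fs => x :: pvFill t fs
  | none :: t, [] => pvFill t []
  | none :: t, f :: fs => f :: pvFill t fs

def pvMissing (ids : List (Option String)) : List Int :=
  (PySem.List.enumerate ids).filterMap (fun p => if p.2 = none then some p.1 else none)

theorem pvEnum_shift {α : Type} (xs : List α) (s : Int) :
    PySem.List.enumerate xs (s + 1) = (PySem.List.enumerate xs s).map (fun p => (p.1 + 1, p.2)) := by
  induction xs generalizing s with
  | nil => simp [PySem.List.enumerate_nil]
  | cons x t ih => simp [PySem.List.enumerate_cons, ih]

theorem pvFilterMap_shift (e : List (Int × Option String)) :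
    (e.map (fun p => (p.1 + 1, p.2))).filterMap (fun p => if p.2 = none then some p.1 else none) =
      ((e.filterMap (fun p => if p.2 = none then some p.1 else none)).map (· + 1)) := by
  induction e with
  | nil => simp
  | cons p e ih => cases hp : p.2 <;> simp [hp, ih]

theorem pvMissing_cons_some (x : String) (t : List (Option String)) :
    pvMissing (some x :: t) = (pvMissing t).map (· + 1) := by
  unfold pvMissing
  rw [PySem.List.enumerate_cons, pvEnum_shift, List.filterMap_cons, pvFilterMap_shift]
  simp

theorem pvMissing_cons_none (t : List (Option String)) :
    pvMissing (none :: t) = 0 :: (pvMissing t).map (· + 1) := by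
  unfold pvMissing
  rw [PySem.List.enumerate_cons, pvEnum_shift, List.filterMap_cons, pvFilterMap_shift]
  simp

theorem pvMissing_nonneg (ids : List (Option String)) : ∀ i ∈ pvMissing ids, 0 ≤ i := by
  induction ids with
  | nil => simp [pvMissing, PySem.List.enumerate_nil]
  | cons o t ih =>
    intro i hi
    cases o with
    | some x =>
      rw [pvMissing_cons_some] at hi
      obtain ⟨j, hj, rfl⟩ := List.mem_map.1 hi
      have := ih j hj; omega
    | none =>
      rw [pvMissing_cons_none] at hi
      rcases List.mem_cons.1 hi with rfl | hi
      · omega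
      · obtain ⟨j, hj, rfl⟩ := List.mem_map.1 hi
        have := ih j hj; omega

theorem pvMissing_length (ids : List (Option String)) :
    (pvMissing ids).length = ids.count none := by
  induction ids with
  | nil => simp [pvMissing, PySem.List.enumerate_nil]
  | cons o t ih =>
    cases o with
    | some x => rw [pvMissing_cons_some]; simp [ih]
    | none => rw [pvMissing_cons_none]; simp [ih]

theorem pvSets_shift (pairs : List (Int × String)) (h : ∀ p ∈ pairs, 0 ≤ p.1)
    (a : Option String) (l : List (Option String)) :
    (pairs.map (Prod.map (· + 1) id)).foldl (fun l p => l.set p.1.toNat p.2) (a :: l) =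
      a :: pairs.foldl (fun l p => l.set p.1.toNat p.2) l := by
  induction pairs generalizing l with
  | nil => simp
  | cons p ps ih =>
    simp only [List.map_cons, List.foldl_cons, Prod.map]
    have hp : (p.1 + 1).toNat = p.1.toNat + 1 := by
      have := h p (by simp); omega
    rw [hp, List.set_cons_succ, ih (fun q hq => h q (by simp [hq]))]
    simp

theorem pvFillA (ids : List (Option String)) (fresh : List String)
    (hlen : fresh.length = (pvMissing ids).length) :
    (((pvMissing ids).zip fresh).foldl (fun l p => l.set p.1.toNat p.2) ids).filterMap id =
      pvFill ids fresh := by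
  induction ids generalizing fresh with
  | nil => simp [pvMissing, PySem.List.enumerate_nil, pvFill]
  | cons o t ih =>
    cases o with
    | some x =>
      rw [pvMissing_cons_some] at hlen ⊢
      simp only [List.length_map] at hlen
      rw [List.zip_map_left]
      rw [pvSets_shift ((pvMissing t).zip fresh)
        (fun q hq => pvMissing_nonneg t q.1 (List.of_mem_zip hq).1) (some x) t]
      simp only [List.filterMap_cons, id_eq]
      rw [show (fun (x : Option String) => x) = @id (Option String) from rfl, ih fresh hlen]
      rfl
    | none =>
      rw [pvMissing_cons_none] at hlen ⊢
      simp only [List.length_cons, List.length_map] at hlen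
      cases fresh with
      | nil => simp at hlen
      | cons f fs =>
        simp only [List.zip_cons_cons, List.foldl_cons, Int.toNat_zero, List.set_cons_zero]
        rw [List.zip_map_left]
        rw [pvSets_shift ((pvMissing t).zip fs)
          (fun q hq => pvMissing_nonneg t q.1 (List.of_mem_zip hq).1) (some f) t]
        simp only [List.filterMap_cons, id_eq]
        rw [show (fun (x : Option String) => x) = @id (Option String) from rfl, ih fs (by simpa using hlen)]
        rfl

-- the heart: filling the nones of the lookup list from the batch generator
-- equals B's single member loop with the persistent counter
theorem pvFill_eq_loopB (d : PySem.Dict String String) (ms : List String)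
    (u : PySem.Set String) (n : Int) :
    pvFill (ms.map (fun m => d.get? m)) (pvGenP u n ((ms.map (fun m => d.get? m)).count none)) =
      pvLoopB d u n [] ms := by
  induction ms generalizing u n with
  | nil => simp [pvFill, pvLoopB]
  | cons m ms ih =>
    simp only [List.map_cons]
    cases h : PySem.Dict.get? d m with
    | some v =>
      rw [show ((some v :: ms.map (fun m => d.get? m)).count none) = (ms.map (fun m => d.get? m)).count none by
        simp]
      rw [pvFill, ih, pvLoopB_cons_some d u n [] m ms v h, pvLoopB_acc d u n ([] ++ [v]) ms]
      simp
    | none =>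
      rw [show ((none :: ms.map (fun m => d.get? m)).count none) = (ms.map (fun m => d.get? m)).count none + 1 by
        simp]
      rw [pvGenP_succ, pvFill, ih, pvLoopB_cons_none d u n [] m ms h,
        pvLoopB_acc d _ _ ([] ++ [pvCid (pvSkip u n).2]) ms]
      simp

theorem canonical_ids_for_members_eq (events : List (List (String × String))) (members : List String) :
    canonical_ids_for_members_py events members = canonical_ids_for_members_py_alt events members := by
  simp only [canonical_ids_for_members_py, canonical_ids_for_members_py_alt, pvNextCanonicalIds]
  rw [pvFused_eq, pvGen_eq_pvGenP]
  simp only [List.length_nil, Nat.sub_zero, List.nil_append]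
  have hmiss : ∀ ids : List (Option String),
      (PySem.List.enumerate ids).filterMap (fun p => if p.2 = none then some p.1 else none) =
        pvMissing ids := fun _ => rfl
  rw [hmiss, pvFillA _ _ (by rw [pvGenP_length]), pvMissing_length]
  exact pvFill_eq_loopB _ members _ 1

-- ===== VERDICT (by name: the statement is the Claim_ definition above) =====
theorem canonical_ids_for_members_py_spec : Claim_equal_canonical_ids_for_members_py := by
  intro events members _
  unfold Spec_canonical_ids_for_members_py
  exact canonical_ids_for_members_eq events members
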